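-- pv_equiv track=rewrite | github.com/UnderGraduateCoder/web-design-agency | tools/security_audit.py | build_codebase_context
-- ===== SOURCE A (Python) =====
-- def build_codebase_context(files: dict[str, str], max_chars: int = 120_000) -> str:
--     parts = []
--     total = 0
--     for rel_path, content in files.items():
--         block = f"=== FILE: {rel_path} ===\n{content}\n"
--         if total + len(block) > max_chars:
--             parts.append("=== [truncated — codebase too large, showing representative sample] ===")
--             break
--         parts.append(block)
--         total += len(block)
--     return "\n".join(parts)
-- ===== SOURCE B (Python) =====
-- def build_codebase_context(files: dict[str, str], max_chars: int = 120_000) -> str: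
--     blocks = [f"=== FILE: {p} ===\n{c}\n" for p, c in files.items()]
--     prefix = []
--     run = 0
--     for b in blocks:
--         run += len(b)
--         prefix.append(run)
--     cut = None
--     for i, run_total in enumerate(prefix):
--         if run_total > max_chars:
--             cut = i
--             break
--     if cut is None:
--         return "\n".join(blocks)
--     return "\n".join(blocks[:cut] + ["=== [truncated — codebase too large, showing representative sample] ==="])
-- ===== Notes on version B (the rewrite author's own statement) =====
-- stated objective: alternative
-- what changed: Replaces A's single greedy loop with running total and break by a staged pipeline: build the full block list, compute a prefix-sum table of block lengths, scan the table for the first cumulative total exceeding the budget, then slice the block list there and join.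
import Mathlib
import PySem

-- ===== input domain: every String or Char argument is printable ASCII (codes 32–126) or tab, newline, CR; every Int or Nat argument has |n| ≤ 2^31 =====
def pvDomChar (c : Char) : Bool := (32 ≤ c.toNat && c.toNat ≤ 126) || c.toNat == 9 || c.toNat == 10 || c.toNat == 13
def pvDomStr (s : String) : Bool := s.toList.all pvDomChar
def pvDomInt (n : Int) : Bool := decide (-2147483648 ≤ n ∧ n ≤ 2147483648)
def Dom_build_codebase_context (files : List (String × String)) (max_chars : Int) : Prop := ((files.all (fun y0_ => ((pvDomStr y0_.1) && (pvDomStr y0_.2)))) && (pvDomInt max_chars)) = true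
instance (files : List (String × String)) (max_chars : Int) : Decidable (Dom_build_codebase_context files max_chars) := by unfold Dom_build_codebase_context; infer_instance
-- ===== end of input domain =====

-- B replaces A's greedy loop-with-break by a staged pipeline (block list, prefix-sum table,
-- scan for the first overflow, slice and join); same asymptotic cost, different decomposition.


-- ===== PORT A =====
-- A's loop: accumulate blocks and a running total; on overflow append the marker and break.
def pvLoopA (mc : Int) : List (String × String) → Int → List String → List String
  | [], _, parts => parts
  | pc :: rest, total, parts =>
    let block := "=== FILE: " ++ pc.1 ++ " ===\n" ++ pc.2 ++ "\n"
    if total + (PySem.Str.len block : Int) > mc then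
      parts ++ ["=== [truncated — codebase too large, showing representative sample] ==="]
    else
      pvLoopA mc rest (total + (PySem.Str.len block : Int)) (parts ++ [block])

def build_codebase_context (files : List (String × String)) (max_chars : Int) : String :=
  PySem.Str.join "\n" (pvLoopA max_chars files 0 [])

-- ===== PORT B =====
def build_codebase_context_alt (files : List (String × String)) (max_chars : Int) : String :=
  let blocks := files.map (fun pc => "=== FILE: " ++ pc.1 ++ " ===\n" ++ pc.2 ++ "\n")
  -- prefix-sum table of block lengths (run, prefix)
  let st := blocks.foldl
    (fun st b => (st.1 + (PySem.Str.len b : Int), st.2 ++ [st.1 + (PySem.Str.len b : Int)]))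
    ((0 : Int), ([] : List Int))
  -- first index whose cumulative total exceeds the budget
  let cut := ((PySem.List.enumerate st.2 0).find? (fun iv => decide (iv.2 > max_chars))).map (·.1)
  match cut with
  | none => PySem.Str.join "\n" blocks
  | some i => PySem.Str.join "\n" (PySem.List.slice blocks none (some i) ++
      ["=== [truncated — codebase too large, showing representative sample] ==="])

-- ===== PRECONDITION & SPEC =====
def Spec_build_codebase_context (files : List (String × String)) (max_chars : Int) (out : String) : Prop := out = build_codebase_context_alt files max_chars
instance (files : List (String × String)) (max_chars : Int) (out : String) : Decidable (Spec_build_codebase_context files max_chars out) := by unfold Spec_build_codebase_context; infer_instance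

-- ===== CLAIM (what is proved, stated in full; the proofs are below) =====
def Claim_equal_build_codebase_context : Prop := ∀ (files : List (String × String)) (max_chars : Int), Dom_build_codebase_context files max_chars → Spec_build_codebase_context files max_chars (build_codebase_context files max_chars)

-- ===== LEMMAS AND PROOFS =====

def pvMarker : String := "=== [truncated — codebase too large, showing representative sample] ==="

def pvBlock (pc : String × String) : String := "=== FILE: " ++ pc.1 ++ " ===\n" ++ pc.2 ++ "\n"

-- blocks A keeps, as a function of the running total
def pvSel (mc : Int) : Int → List String → List String
  | _, [] => []
  | t, b :: bs =>
    if t + (PySem.Str.len b : Int) > mc then [pvMarker]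
    else b :: pvSel mc (t + (PySem.Str.len b : Int)) bs

-- first index whose cumulative total (starting from t) exceeds mc
def pvCut (mc : Int) : Int → List String → Option Nat
  | _, [] => none
  | t, b :: bs =>
    if t + (PySem.Str.len b : Int) > mc then some 0
    else (pvCut mc (t + (PySem.Str.len b : Int)) bs).map (· + 1)

-- prefix sums of block lengths, starting from t
def pvPrefixes : Int → List String → List Int
  | _, [] => []
  | t, b :: bs => (t + (PySem.Str.len b : Int)) :: pvPrefixes (t + (PySem.Str.len b : Int)) bs

theorem pvLoopA_eq_sel (mc : Int) (fs : List (String × String)) (t : Int) (parts : List String) :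
    pvLoopA mc fs t parts = parts ++ pvSel mc t (fs.map pvBlock) := by
  induction fs generalizing t parts with
  | nil => simp [pvLoopA, pvSel]
  | cons pc rest ih =>
    simp only [pvLoopA, List.map_cons, pvSel, pvBlock, pvMarker]
    split
    · rfl
    · rw [ih]; simp

theorem pvFoldl_prefix (bs : List String) (r : Int) (acc : List Int) :
    (bs.foldl
      (fun st b => (st.1 + (PySem.Str.len b : Int), st.2 ++ [st.1 + (PySem.Str.len b : Int)]))
      (r, acc)).2 = acc ++ pvPrefixes r bs := by
  induction bs generalizing r acc with
  | nil => simp [pvPrefixes]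
  | cons b bs ih =>
    rw [List.foldl_cons, ih]
    simp [pvPrefixes]

theorem pvFind_eq_cut (mc : Int) (bs : List String) (t : Int) (s : Int) :
    ((PySem.List.enumerate (pvPrefixes t bs) s).find? (fun iv => decide (iv.2 > mc))).map (·.1)
      = (pvCut mc t bs).map (fun n => s + (n : Int)) := by
  induction bs generalizing t s with
  | nil => simp [pvPrefixes, pvCut, PySem.List.enumerate_nil]
  | cons b bs ih =>
    by_cases h : mc < t + (b.length : Int)
    · simp [pvPrefixes, pvCut, PySem.List.enumerate_cons, h]
    · simp only [pvPrefixes, pvCut, PySem.List.enumerate_cons, List.find?_cons]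
      rw [show (decide ((((s : Int), t + (PySem.Str.len b : Int)) : Int × Int).2 > mc)) = false from by
        simpa using h]
      rw [ih, if_neg (by simpa using h)]
      cases pvCut mc (t + (PySem.Str.len b : Int)) bs with
      | none => simp
      | some n =>
        simp
        ring

theorem pvSel_eq_cut (mc : Int) (bs : List String) (t : Int) :
    pvSel mc t bs = match pvCut mc t bs with
      | none => bs
      | some i => bs.take i ++ [pvMarker] := by
  induction bs generalizing t with
  | nil => simp [pvSel, pvCut]
  | cons b bs ih =>
    by_cases h : mc < t + (b.length : Int)
    · simp [pvSel, pvCut, h]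
    · simp only [pvSel, pvCut]
      rw [if_neg (by simpa using h), if_neg (by simpa using h), ih]
      cases pvCut mc (t + (PySem.Str.len b : Int)) bs with
      | none => simp
      | some n => simp [List.take_succ_cons]

-- ===== VERDICT (by name: the statement is the Claim_ definition above) =====
theorem build_codebase_context_spec : Claim_equal_build_codebase_context := by
  intro files mc _
  unfold Spec_build_codebase_context build_codebase_context build_codebase_context_alt
  rw [pvLoopA_eq_sel]
  simp only [List.nil_append]
  have hblocks : files.map (fun pc => "=== FILE: " ++ pc.1 ++ " ===\n" ++ pc.2 ++ "\n")
      = files.map pvBlock := rfl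
  rw [hblocks, pvFoldl_prefix, List.nil_append, pvFind_eq_cut, pvSel_eq_cut]
  cases hc : pvCut mc 0 (files.map pvBlock) with
  | none => simp
  | some n =>
    simp [pvMarker, PySem.List.slice_to_natCast]
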